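-- pv_equiv track=rewrite | github.com/rchermanteev/mephi-python | nir/preprocessing.py | find_horizontal_line
-- ===== SOURCE A (Python) =====
-- from collections import Counter
--
-- def find_horizontal_line(img):  # TODO: Переделать через Хафа
--     list_point = []
--
--     for j in range(len(img[0])):
--         i = 0
--         while img[i][j] != 255 and i < len(img) - 1:
--             i += 1
--         list_point.append(i)
--
--     c = Counter(list_point).most_common(1)
--     line_cord = c[0][0]
--
--     return line_cord
-- ===== SOURCE B (Python) =====
-- from collections import Counter
--
-- def find_horizontal_line(img):
--     n = len(img)
--     w = len(img[0])
--     result = [n - 1] * w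
--     found = [False] * w
--     for r in range(n - 1):
--         row = img[r]
--         for j in range(w):
--             if not found[j] and row[j] == 255:
--                 result[j] = r
--                 found[j] = True
--     return Counter(result).most_common(1)[0][0]
-- ===== Notes on version B (the rewrite author's own statement) =====
-- stated objective: alternative
-- what changed: Replaces the per-column top-down while-loop scans with a single row-major sweep maintaining a per-column found-flag/result array (default len(img)-1), then takes the Counter mode of the column-ordered result list.
-- outside the precondition, e.g. on find_horizontal_line([[0, 255], [0]]): A returns 1, B returns 1
import Mathlib
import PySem

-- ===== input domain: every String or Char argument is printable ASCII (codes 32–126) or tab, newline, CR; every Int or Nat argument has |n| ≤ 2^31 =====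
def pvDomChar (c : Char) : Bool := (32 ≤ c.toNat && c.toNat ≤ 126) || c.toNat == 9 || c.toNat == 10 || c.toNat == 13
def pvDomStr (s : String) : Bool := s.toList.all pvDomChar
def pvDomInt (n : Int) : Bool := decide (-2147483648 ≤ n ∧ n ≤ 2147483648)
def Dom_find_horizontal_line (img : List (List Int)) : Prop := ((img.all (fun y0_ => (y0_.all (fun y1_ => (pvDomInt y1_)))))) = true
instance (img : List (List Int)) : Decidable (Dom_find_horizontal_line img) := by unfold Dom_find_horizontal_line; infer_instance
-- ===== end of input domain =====

-- B replaces A's independent per-column while-loop scans by a single row-major sweep with a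
-- per-column found-flag/result array; same Counter-mode step at the end (objective: alternative).

-- Counter(l).most_common(1)[0][0]: counts keyed in first-occurrence order, first key of maximal
-- count (Counter.most_common is a stable sort by descending count).  Shared by both ports because
-- both Pythons end with this exact Counter call.
def counterItems (l : List Int) : List (Int × Nat) :=
  l.foldl (fun acc x =>
    if acc.any (fun p => p.1 = x) then acc.map (fun p => if p.1 = x then (p.1, p.2 + 1) else p)
    else acc ++ [(x, 1)]) []

def pyMostCommon (l : List Int) : Int :=
  (((counterItems l).foldl (fun best p =>
      match best with
      | none => some p
      | some q => if p.2 > q.2 then some p else some q) none).getD (0, 0)).1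

-- ===== PORT A =====
-- the inner `while img[i][j] != 255 and i < len(img) - 1: i += 1` loop; indices are in range on Pre_
def aWhile (img : List (List Int)) (j : Nat) (i : Nat) : Nat :=
  if h : ((img.getD i []).getD j 0 ≠ 255) ∧ i < img.length - 1 then aWhile img j (i + 1)
  else i
termination_by img.length - i
decreasing_by omega

def find_horizontal_line (img : List (List Int)) : Int :=
  let list_point := (List.range (img.headD []).length).map (fun j => (aWhile img j 0 : Int))
  pyMostCommon list_point

-- ===== PORT B =====
-- result/found arrays fused into one list of pairs; one row-major sweep over rows 0..len-2
def find_horizontal_line_alt (img : List (List Int)) : Int :=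
  let n := img.length
  let w := (img.headD []).length
  let init : List (Int × Bool) := List.replicate w ((n : Int) - 1, false)
  let final := (List.range (n - 1)).foldl (fun st r =>
      let row := img.getD r []
      st.mapIdx (fun j p => if p.2 = false ∧ row.getD j 0 = 255 then ((r : Int), true) else p)) init
  pyMostCommon (final.map Prod.fst)

-- ===== PRECONDITION & SPEC =====
-- A raises IndexError on an empty or zero-width image (img[0] / c[0]) and can raise on ragged
-- images whose short rows its column scans reach; Pre_ keeps the natural domain: nonempty images
-- whose rows are at least as long as the first row.  On excluded ragged inputs where A happens to
-- return, B returns the same value (see claim cites).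
def Pre_find_horizontal_line (img : List (List Int)) : Prop :=
  0 < (img.headD []).length ∧ ∀ row ∈ img, (img.headD []).length ≤ row.length
instance (img : List (List Int)) : Decidable (Pre_find_horizontal_line img) := by
  unfold Pre_find_horizontal_line; infer_instance

def pvWitness_find_horizontal_line : List (List Int) := [[0, 255], [255, 0]]

def Spec_find_horizontal_line (img : List (List Int)) (out : Int) : Prop := out = find_horizontal_line_alt img
instance (img : List (List Int)) (out : Int) : Decidable (Spec_find_horizontal_line img out) := by unfold Spec_find_horizontal_line; infer_instance

-- ===== CLAIM (what is proved, stated in full; the proofs are below) =====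
def Claim_equal_find_horizontal_line : Prop := ∀ (img : List (List Int)), Dom_find_horizontal_line img → Pre_find_horizontal_line img → Spec_find_horizontal_line img (find_horizontal_line img)

-- ===== LEMMAS AND PROOFS =====

-- the value both sides compute for column j
def firstWhite (img : List (List Int)) (j : Nat) : Int :=
  match (List.range (img.length - 1)).find? (fun i => (img.getD i []).getD j 0 = 255) with
  | some i => (i : Int)
  | none => ((img.length - 1 : Nat) : Int)

theorem aWhile_eq (img : List (List Int)) (j i : Nat) (hi : i ≤ img.length - 1) :
    (aWhile img j i : Int) =
      match (List.range' i (img.length - 1 - i)).find? (fun i => (img.getD i []).getD j 0 = 255) with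
      | some k => (k : Int)
      | none => ((img.length - 1 : Nat) : Int) := by
  fun_induction aWhile img j i with
  | case1 i h ih =>
    obtain ⟨hne, hlt⟩ := h
    have hstep : img.length - 1 - i = (img.length - 1 - (i + 1)) + 1 := by omega
    rw [hstep, List.range'_succ, List.find?_cons, decide_eq_false hne]
    exact ih (by omega)
  | case2 i h =>
    by_cases hlt : i < img.length - 1
    · have h255 : (img.getD i []).getD j 0 = 255 := by
        by_contra hne
        exact h ⟨hne, hlt⟩
      have hstep : img.length - 1 - i = (img.length - 1 - (i + 1)) + 1 := by omega
      rw [hstep, List.range'_succ, List.find?_cons, decide_eq_true h255]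
    · have hi' : i = img.length - 1 := by omega
      subst hi'
      simp

theorem aWhile_zero (img : List (List Int)) (j : Nat) :
    (aWhile img j 0 : Int) = firstWhite img j := by
  rw [aWhile_eq img j 0 (Nat.zero_le _), firstWhite]
  rw [show List.range' 0 (img.length - 1 - 0) = List.range (img.length - 1) by
    simp [List.range_eq_range']]

theorem mapIdx_map_range {α : Type} (w : Nat) (g : Nat → α) (f : Nat → α → α) :
    ((List.range w).map g).mapIdx f = (List.range w).map (fun j => f j (g j)) := by
  apply List.ext_getElem <;> simp

-- invariant of B's row-major fold
theorem bFold_eq (img : List (List Int)) (w k : Nat) :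
    (List.range k).foldl (fun st r =>
        st.mapIdx (fun j p => if p.2 = false ∧ (img.getD r []).getD j 0 = 255 then ((r : Int), true) else p))
      (List.replicate w ((img.length : Int) - 1, false)) =
    (List.range w).map (fun j =>
      match (List.range k).find? (fun i => (img.getD i []).getD j 0 = 255) with
      | some i => ((i : Int), true)
      | none => ((img.length : Int) - 1, false)) := by
  induction k with
  | zero => simp [List.map_const']
  | succ k ih =>
    rw [List.range_succ, List.foldl_append, ih, List.foldl_cons, List.foldl_nil,
        mapIdx_map_range]
    apply List.map_congr_left
    intro j _
    rw [List.find?_append]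
    cases hf : (List.range k).find? (fun i => (img.getD i []).getD j 0 = 255) with
    | some i => simp
    | none =>
      by_cases h255 : (img[k]?.getD [])[j]?.getD 0 = 255 <;> simp [h255]

theorem lists_eq (img : List (List Int)) (hn : img ≠ []) :
    (List.range (img.headD []).length).map (fun j => (aWhile img j 0 : Int)) =
      ((List.range ((img.headD []).length)).map (fun j =>
        match (List.range (img.length - 1)).find? (fun i => (img.getD i []).getD j 0 = 255) with
        | some i => ((i : Int), true)
        | none => ((img.length : Int) - 1, false))).map Prod.fst := by
  rw [List.map_map]
  apply List.map_congr_left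
  intro j _
  simp only [Function.comp]
  rw [aWhile_zero img j, firstWhite]
  have hlen : 0 < img.length := List.length_pos_iff.mpr hn
  cases hf : (List.range (img.length - 1)).find? (fun i => (img.getD i []).getD j 0 = 255) with
  | some i => rfl
  | none =>
    show ((img.length - 1 : Nat) : Int) = (img.length : Int) - 1
    omega

-- ===== VERDICT (by name: the statement is the Claim_ definition above) =====
theorem find_horizontal_line_spec : Claim_equal_find_horizontal_line := by
  intro img _hdom hpre
  obtain ⟨hw, _⟩ := hpre
  have hn : img ≠ [] := by
    intro h; subst h; simp at hw
  show find_horizontal_line img = find_horizontal_line_alt img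
  unfold find_horizontal_line find_horizontal_line_alt
  simp only []
  rw [bFold_eq img (img.headD []).length (img.length - 1)]
  rw [lists_eq img hn]
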